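-- pv_equiv track=rewrite | github.com/MNico99/Sintaxis-TP01 | GSin.py | A_FOR
-- ===== SOURCE A (Python) =====
-- TRAMPA = -1
--
-- RESULTADO_ACEPTADO = "ACEPTADO"
--
-- RESULTADO_TRAMPA = "TRAMPA"
--
-- RESULTADO_NO_ACEPTADO = "NO_ACEPTADO"
--
-- def d_FOR(estado_anterior, caracter):
--     if estado_anterior == 0 and caracter == "f":
--         return 1
--     if estado_anterior == 1 and caracter == "o":
--         return 2
--     if estado_anterior == 2 and caracter == "r":
--         return 3
--
--     return TRAMPA
--
-- def A_FOR(cadena):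
--     Finales = [3]
--     estado_actual = 0
--
--     for caracter in cadena:
--         estado_proximo = d_FOR(estado_actual, caracter)
--         if estado_proximo == TRAMPA:
--             return RESULTADO_TRAMPA
--         estado_actual = estado_proximo
--
--     if estado_actual in Finales:
--         return RESULTADO_ACEPTADO
--     else:
--         return RESULTADO_NO_ACEPTADO
-- ===== SOURCE B (Python) =====
-- RESULTADO_ACEPTADO = "ACEPTADO"
-- RESULTADO_TRAMPA = "TRAMPA"
-- RESULTADO_NO_ACEPTADO = "NO_ACEPTADO"
--
-- def A_FOR(cadena):
--     chars = list(cadena)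
--     target = ['f', 'o', 'r']
--     if chars == target:
--         return RESULTADO_ACEPTADO
--     if chars == target[:len(chars)]:
--         return RESULTADO_NO_ACEPTADO
--     return RESULTADO_TRAMPA
-- ===== Notes on version B (the rewrite author's own statement) =====
-- stated objective: simpler
-- what changed: Replaces the DFA state machine (transition function d_FOR, state variable, early return) with two list-equality comparisons against the target ['f','o','r'] and its prefix.
import Mathlib
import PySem

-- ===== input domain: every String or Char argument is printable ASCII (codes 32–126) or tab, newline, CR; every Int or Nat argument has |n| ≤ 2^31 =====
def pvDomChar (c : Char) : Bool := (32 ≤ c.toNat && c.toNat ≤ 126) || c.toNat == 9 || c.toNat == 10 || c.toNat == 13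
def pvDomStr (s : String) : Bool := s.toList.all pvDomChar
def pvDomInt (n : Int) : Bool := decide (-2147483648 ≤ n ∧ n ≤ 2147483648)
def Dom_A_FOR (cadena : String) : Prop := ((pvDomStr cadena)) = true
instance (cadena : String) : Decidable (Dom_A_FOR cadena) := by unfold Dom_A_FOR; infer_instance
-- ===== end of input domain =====

-- B replaces the DFA (transition function + state loop) by two equality comparisons
-- against the target ['f','o','r'] and its prefix; objective: simpler.

-- ===== PORT A =====
def d_FOR (estado_anterior : Int) (caracter : Char) : Int :=
  if estado_anterior = 0 ∧ caracter = 'f' then 1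
  else if estado_anterior = 1 ∧ caracter = 'o' then 2
  else if estado_anterior = 2 ∧ caracter = 'r' then 3
  else (-1)

-- the for-loop of A with its early return, as structural recursion over the characters
def A_FOR_loop (estado_actual : Int) : List Char → String
  | [] => if [(3 : Int)].contains estado_actual then "ACEPTADO" else "NO_ACEPTADO"
  | caracter :: rest =>
      let estado_proximo := d_FOR estado_actual caracter
      if estado_proximo = -1 then "TRAMPA"
      else A_FOR_loop estado_proximo rest

def A_FOR (cadena : String) : String := A_FOR_loop 0 cadena.toList

-- ===== PORT B =====
def A_FOR_alt (cadena : String) : String :=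
  let chars := cadena.toList
  let target := ['f', 'o', 'r']
  if chars = target then "ACEPTADO"
  else if chars = target.take chars.length then "NO_ACEPTADO"
  else "TRAMPA"

-- ===== PRECONDITION & SPEC =====
def Spec_A_FOR (cadena : String) (out : String) : Prop := out = A_FOR_alt cadena
instance (cadena : String) (out : String) : Decidable (Spec_A_FOR cadena out) := by unfold Spec_A_FOR; infer_instance

-- ===== CLAIM (what is proved, stated in full; the proofs are below) =====
def Claim_equal_A_FOR : Prop := ∀ (cadena : String), Dom_A_FOR cadena → Spec_A_FOR cadena (A_FOR cadena)

-- ===== LEMMAS AND PROOFS =====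

theorem A_FOR_list (l : List Char) :
    A_FOR_loop 0 l =
      (if l = ['f', 'o', 'r'] then "ACEPTADO"
       else if l = (['f', 'o', 'r'] : List Char).take l.length then "NO_ACEPTADO"
       else "TRAMPA") := by
  match l with
  | [] => simp [A_FOR_loop]
  | [c1] =>
      by_cases h1 : c1 = 'f' <;> simp [A_FOR_loop, d_FOR, h1]
  | [c1, c2] =>
      by_cases h1 : c1 = 'f' <;> by_cases h2 : c2 = 'o' <;>
        simp [A_FOR_loop, d_FOR, h1, h2]
  | [c1, c2, c3] =>
      by_cases h1 : c1 = 'f' <;> by_cases h2 : c2 = 'o' <;> by_cases h3 : c3 = 'r' <;>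
        simp [A_FOR_loop, d_FOR, h1, h2, h3]
  | c1 :: c2 :: c3 :: c4 :: rest =>
      by_cases h1 : c1 = 'f' <;> by_cases h2 : c2 = 'o' <;> by_cases h3 : c3 = 'r' <;>
        simp [A_FOR_loop, d_FOR, h1, h2, h3, List.take]

-- ===== VERDICT (by name: the statement is the Claim_ definition above) =====
theorem A_FOR_spec : Claim_equal_A_FOR := by
  intro cadena _
  unfold Spec_A_FOR A_FOR A_FOR_alt
  simpa using A_FOR_list cadena.toList
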